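-- pv_equiv track=rewrite | github.com/drewtuley/LAMBCHOP | SecurityQueue/threadworker.py | security_gate
-- ===== SOURCE A (Python) =====
-- def security_gate(worker, length):
--     place = worker
--     checksum = 0
--     end = worker+length
--     while place < end:
--         checksum ^= worker
--         worker += 1
--         place += 1
--     return checksum
-- ===== SOURCE B (Python) =====
-- def security_gate(worker, length):
--     # Closed-form XOR of the consecutive integers worker..worker+length-1:
--     # adjacent (even, even+1) pairs XOR to 1, so only the pair-count parity
--     # and an unpaired endpoint survive. O(1) instead of A's O(length) loop.
--     if length <= 0:
--         return 0
--     a = worker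
--     b = worker + length - 1
--     if a % 2 == 1:
--         if a == b:
--             return a
--         res = a
--         a += 1
--     else:
--         res = 0
--     n = b - a + 1
--     res ^= (n // 2) & 1
--     if n % 2 == 1:
--         res ^= b
--     return res
-- ===== Notes on version B (the rewrite author's own statement) =====
-- stated objective: faster
-- what changed: Replaces the O(length) accumulation loop with an O(1) closed form: consecutive (even,odd) pairs XOR to 1, so the result is the pair-count parity XORed with the unpaired endpoints.
import Mathlib
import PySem

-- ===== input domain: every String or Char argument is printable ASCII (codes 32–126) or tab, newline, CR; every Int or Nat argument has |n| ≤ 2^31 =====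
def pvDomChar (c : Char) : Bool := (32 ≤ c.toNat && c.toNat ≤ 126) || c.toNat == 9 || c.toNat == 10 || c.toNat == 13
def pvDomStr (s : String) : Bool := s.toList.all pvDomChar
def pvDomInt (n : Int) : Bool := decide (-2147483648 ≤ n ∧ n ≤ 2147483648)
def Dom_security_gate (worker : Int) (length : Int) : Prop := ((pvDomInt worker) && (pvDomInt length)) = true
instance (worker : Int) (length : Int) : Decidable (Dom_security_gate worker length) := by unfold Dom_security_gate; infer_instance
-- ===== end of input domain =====

-- B replaces A's O(length) XOR loop with an O(1) closed form (consecutive even/odd pairs XOR to 1).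

-- ===== PORT A =====
-- the while loop runs exactly (end - place).toNat = length.toNat times, incrementing worker each time
def secLoopA (worker : Int) : Nat → Int → Int
  | 0, checksum => checksum
  | n+1, checksum => secLoopA (worker + 1) n (PySem.Int.bxor checksum worker)

def security_gate (worker : Int) (length : Int) : Int :=
  secLoopA worker length.toNat 0

-- ===== PORT B =====
def security_gate_alt (worker : Int) (length : Int) : Int :=
  if length ≤ 0 then 0
  else
    let a := worker
    let b := worker + length - 1
    if PySem.Int.mod a 2 = 1 then
      if a = b then a
      else
        let res := a
        let a := a + 1
        let n := b - a + 1
        let res := PySem.Int.bxor res (PySem.Int.band (PySem.Int.floordiv n 2) 1)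
        if PySem.Int.mod n 2 = 1 then PySem.Int.bxor res b else res
    else
      let res : Int := 0
      let n := b - a + 1
      let res := PySem.Int.bxor res (PySem.Int.band (PySem.Int.floordiv n 2) 1)
      if PySem.Int.mod n 2 = 1 then PySem.Int.bxor res b else res

-- ===== PRECONDITION & SPEC =====
def Spec_security_gate (worker : Int) (length : Int) (out : Int) : Prop := out = security_gate_alt worker length
instance (worker : Int) (length : Int) (out : Int) : Decidable (Spec_security_gate worker length out) := by unfold Spec_security_gate; infer_instance

-- ===== CLAIM (what is proved, stated in full; the proofs are below) =====
def Claim_equal_security_gate : Prop := ∀ (worker : Int) (length : Int), Dom_security_gate worker length → Spec_security_gate worker length (security_gate worker length)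

-- ===== LEMMAS AND PROOFS =====

-- signed encoding of an Int: encI false m = m, encI true m = -m-1 (two's-complement view)
def encI : Bool → Nat → Int
  | false, m => (m : Int)
  | true,  m => -(m : Int) - 1

theorem bxor_enc (s t : Bool) (m n : Nat) :
    PySem.Int.bxor (encI s m) (encI t n) = encI (s != t) (m ^^^ n) := by
  cases s <;> cases t
  · show PySem.Int.bxor (m:Int) (n:Int) = ((m ^^^ n : Nat) : Int)
    have h1 : (0:Int) ≤ (m:Int) := by omega
    have h2 : (0:Int) ≤ (n:Int) := by omega
    simp only [PySem.Int.bxor, if_pos h1, if_pos h2, Int.toNat_natCast]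
  · show PySem.Int.bxor (m:Int) (-(n:Int)-1) = -((m ^^^ n : Nat) : Int) - 1
    have h1 : (0:Int) ≤ (m:Int) := by omega
    have h2 : ¬ (0:Int) ≤ -(n:Int)-1 := by omega
    have e : (-(-(n:Int)-1)-1).toNat = n := by omega
    simp only [PySem.Int.bxor, if_pos h1, if_neg h2, e, Int.toNat_natCast]
  · show PySem.Int.bxor (-(m:Int)-1) (n:Int) = -((m ^^^ n : Nat) : Int) - 1
    have h1 : ¬ (0:Int) ≤ -(m:Int)-1 := by omega
    have h2 : (0:Int) ≤ (n:Int) := by omega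
    have e : (-(-(m:Int)-1)-1).toNat = m := by omega
    simp only [PySem.Int.bxor, if_neg h1, if_pos h2, e, Int.toNat_natCast]
  · show PySem.Int.bxor (-(m:Int)-1) (-(n:Int)-1) = ((m ^^^ n : Nat) : Int)
    have h1 : ¬ (0:Int) ≤ -(m:Int)-1 := by omega
    have h2 : ¬ (0:Int) ≤ -(n:Int)-1 := by omega
    have e1 : (-(-(m:Int)-1)-1).toNat = m := by omega
    have e2 : (-(-(n:Int)-1)-1).toNat = n := by omega
    simp only [PySem.Int.bxor, if_neg h1, if_neg h2, e1, e2]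

theorem exists_enc (a : Int) : ∃ s m, a = encI s m := by
  by_cases h : 0 ≤ a
  · exact ⟨false, a.toNat, by simp only [encI]; omega⟩
  · exact ⟨true, (-a-1).toNat, by simp only [encI]; omega⟩

theorem bxorA (a b c : Int) :
    PySem.Int.bxor (PySem.Int.bxor a b) c = PySem.Int.bxor a (PySem.Int.bxor b c) := by
  obtain ⟨s, m, rfl⟩ := exists_enc a
  obtain ⟨t, n, rfl⟩ := exists_enc b
  obtain ⟨u, p, rfl⟩ := exists_enc c
  rw [bxor_enc, bxor_enc, bxor_enc, bxor_enc]
  congr 1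
  · cases s <;> cases t <;> cases u <;> rfl
  · exact Nat.xor_assoc m n p

theorem bxor_zero_left (a : Int) : PySem.Int.bxor 0 a = a := by
  rw [PySem.Int.bxor_comm]; exact PySem.Int.bxor_zero a

theorem natEvenXorOne (j : Nat) : (2*j) ^^^ (2*j+1) = 1 := by
  apply Nat.eq_of_testBit_eq
  intro i
  have h1 : 2*j/2 = j := by omega
  have h2 : (2*j+1)/2 = j := by omega
  have h3 : (2*j) % 2 = 0 := by omega
  have h4 : (2*j+1) % 2 = 1 := by omega
  cases i with
  | zero => simp [Nat.testBit_xor, Nat.testBit_zero, h3, h4]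
  | succ i =>
    simp only [Nat.testBit_xor]
    simp only [Nat.testBit_succ, h1, h2]
    simp

theorem evenpair (k : Int) : PySem.Int.bxor (2*k) (2*k+1) = 1 := by
  by_cases h : 0 ≤ k
  · have hp1 : (0:Int) ≤ 2*k := by omega
    have hp2 : (0:Int) ≤ 2*k+1 := by omega
    have e1 : (2*k).toNat = 2*k.toNat := by omega
    have e2 : (2*k+1).toNat = 2*k.toNat + 1 := by omega
    simp only [PySem.Int.bxor, if_pos hp1, if_pos hp2, e1, e2, natEvenXorOne]
    rfl
  · have hp1 : ¬ (0:Int) ≤ 2*k := by omega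
    have hp2 : ¬ (0:Int) ≤ 2*k+1 := by omega
    have e1 : (-(2*k)-1).toNat = 2*(-k-1).toNat + 1 := by omega
    have e2 : (-(2*k+1)-1).toNat = 2*(-k-1).toNat := by omega
    simp only [PySem.Int.bxor, if_neg hp1, if_neg hp2, e1, e2, Nat.xor_comm, natEvenXorOne]
    rfl

-- XOR of the n consecutive integers a, a+1, …, a+n-1
def xr : Int → Nat → Int
  | _, 0 => 0
  | a, n+1 => PySem.Int.bxor a (xr (a+1) n)

theorem secLoopA_eq_xr (n : Nat) : ∀ (w cs : Int), secLoopA w n cs = PySem.Int.bxor cs (xr w n) := by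
  induction n with
  | zero => intro w cs; simp [secLoopA, xr]
  | succ n ih => intro w cs; simp [secLoopA, xr, ih, bxorA]

theorem xr_even (j : Nat) (k : Int) :
    xr (2*k) j = PySem.Int.bxor ((j/2 % 2 : Nat) : Int)
      (if j % 2 = 1 then 2*k + (j:Int) - 1 else 0) := by
  induction j using Nat.strong_induction_on generalizing k with
  | _ j ih =>
    match j with
    | 0 => simp [xr]
    | 1 => simp [xr, bxor_zero_left]
    | (n+2) =>
      have h := ih n (by omega) (k+1)
      have e2 : (2:Int)*k + 1 + 1 = 2*(k+1) := by ring
      have step : xr (2*k) (n+2) = PySem.Int.bxor 1 (xr (2*(k+1)) n) := by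
        show PySem.Int.bxor (2*k) (PySem.Int.bxor (2*k+1) (xr (2*k+1+1) n)) = _
        rw [e2, ← bxorA, evenpair]
      rw [step, h, ← bxorA]
      have hd : (n+2)/2 % 2 = (n/2 + 1) % 2 := by omega
      have hm : (n+2) % 2 = n % 2 := by omega
      have hone : PySem.Int.bxor 1 1 = 0 := by decide
      have hend : 2*(k+1) + (n:Int) - 1 = 2*k + ((n+2 : Nat) : Int) - 1 := by push_cast; ring
      rcases Nat.mod_two_eq_zero_or_one (n/2) with h2 | h2 <;>
        rcases Nat.mod_two_eq_zero_or_one n with hn | hn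
      · have hd2 : (n+2)/2 % 2 = 1 := by omega
        have hm2 : (n+2) % 2 = 0 := by omega
        rw [h2, hn, hd2, hm2]
        norm_num [PySem.Int.bxor_zero]
      · have hd2 : (n+2)/2 % 2 = 1 := by omega
        have hm2 : (n+2) % 2 = 1 := by omega
        rw [h2, hn, hd2, hm2, hend]
        norm_num [PySem.Int.bxor_zero]
      · have hd2 : (n+2)/2 % 2 = 0 := by omega
        have hm2 : (n+2) % 2 = 0 := by omega
        rw [h2, hn, hd2, hm2]
        norm_num [hone]
      · have hd2 : (n+2)/2 % 2 = 0 := by omega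
        have hm2 : (n+2) % 2 = 1 := by omega
        rw [h2, hn, hd2, hm2, hend]
        norm_num [hone, bxor_zero_left]

theorem gate_eq_xr (w l : Int) : security_gate w l = xr w l.toNat := by
  rw [security_gate, secLoopA_eq_xr, bxor_zero_left]

theorem mod_two_cases (a : Int) : PySem.Int.mod a 2 = 0 ∨ PySem.Int.mod a 2 = 1 := by
  have h1 := PySem.Int.mod_nonneg a (b := 2) (by norm_num)
  have h2 := PySem.Int.mod_lt a (b := 2) (by norm_num)
  omega

theorem mod_decomp (a : Int) : 2 * PySem.Int.floordiv a 2 + PySem.Int.mod a 2 = a := by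
  have := PySem.Int.floordiv_mul_add_mod a 2
  omega

-- ===== VERDICT (by name: the statement is the Claim_ definition above) =====
theorem security_gate_spec : Claim_equal_security_gate := by
  intro w l _
  unfold Spec_security_gate security_gate_alt
  by_cases hl : l ≤ 0
  · rw [if_pos hl, gate_eq_xr]
    have : l.toNat = 0 := by omega
    rw [this]; rfl
  · rw [if_neg hl, gate_eq_xr]
    obtain ⟨n, rfl⟩ : ∃ n : Nat, l = (n:Int) := ⟨l.toNat, by omega⟩
    rw [Int.toNat_natCast]
    have hn0 : 1 ≤ n := by omega
    have hk := mod_decomp w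
    set k := PySem.Int.floordiv w 2 with hkdef
    rcases mod_two_cases w with hw | hw
    · -- w even
      have hwk : w = 2*k := by omega
      rw [if_neg (by rw [hw]; norm_num)]
      simp only
      have harg : w + (n:Int) - 1 - w + 1 = (n:Int) := by ring
      rw [harg, hwk, xr_even n k, PySem.Int.band_one]
      have hf : PySem.Int.floordiv (n:Int) 2 = ((n/2 : Nat) : Int) := by
        exact_mod_cast PySem.Int.floordiv_natCast n 2
      have hm1 : PySem.Int.mod (n:Int) 2 = ((n % 2 : Nat) : Int) := by
        exact_mod_cast PySem.Int.mod_natCast n 2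
      have hm2 : PySem.Int.mod ((n/2 : Nat) : Int) 2 = ((n/2 % 2 : Nat) : Int) := by
        exact_mod_cast PySem.Int.mod_natCast (n/2) 2
      rw [hf, hm2, hm1]
      rcases Nat.mod_two_eq_zero_or_one n with hp | hp <;> simp only [hp] <;>
        norm_num [bxor_zero_left, PySem.Int.bxor_zero]
    · -- w odd
      have hwk : w = 2*k + 1 := by omega
      rw [if_pos hw]
      by_cases hb : w = w + (n:Int) - 1
      · rw [if_pos hb]
        have hn1 : n = 1 := by omega
        subst hn1
        rw [show xr w 1 = PySem.Int.bxor w 0 from rfl, PySem.Int.bxor_zero]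
      · rw [if_neg hb]
        simp only
        obtain ⟨m, rfl⟩ : ∃ m : Nat, n = m + 1 := ⟨n - 1, by omega⟩
        have hm0 : 1 ≤ m := by omega
        have hwe : w + 1 = 2*(k+1) := by omega
        have hstep : xr w (m+1) = PySem.Int.bxor w (xr (w+1) m) := rfl
        rw [hstep, hwe, xr_even m (k+1), PySem.Int.band_one]
        have harg : w + ((m+1 : Nat):Int) - 1 - (2*(k+1)) + 1 = (m:Int) := by push_cast; omega
        rw [harg]
        have hf : PySem.Int.floordiv (m:Int) 2 = ((m/2 : Nat) : Int) := by
          exact_mod_cast PySem.Int.floordiv_natCast m 2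
        have hm1 : PySem.Int.mod (m:Int) 2 = ((m % 2 : Nat) : Int) := by
          exact_mod_cast PySem.Int.mod_natCast m 2
        have hm2 : PySem.Int.mod ((m/2 : Nat) : Int) 2 = ((m/2 % 2 : Nat) : Int) := by
          exact_mod_cast PySem.Int.mod_natCast (m/2) 2
        rw [hf, hm2, hm1]
        rcases Nat.mod_two_eq_zero_or_one m with hp | hp
        · simp only [hp]
          norm_num [PySem.Int.bxor_zero]
        · simp only [hp]
          rw [if_pos (show ((1:Nat):Int) = 1 by norm_num), if_true]
          have hendp : 2*(k+1) + (m:Int) - 1 = w + ((m+1 : Nat):Int) - 1 := by push_cast; omega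
          rw [hendp, ← bxorA]
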